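-- pv_equiv track=rewrite | github.com/xxibcill/cc-deep-reasearch | src/cc_deep_research/text_normalization.py | extract_full_sentence_around_keyword
-- ===== SOURCE A (Python) =====
-- def extract_full_sentence_around_keyword(
--     text: str,
--     keyword: str,
--     context_sentences: int = 1,
-- ) -> str:
--     """Extract the full sentence(s) containing a keyword with optional context.
--
--     This replaces fragment extraction with sentence-window extraction to ensure
--     complete sentences in safety and contradiction sections.
--
--     Args:
--         text: Full text to search in.
--         keyword: Keyword to find.
--         context_sentences: Number of adjacent sentences to include.
--
--     Returns:
--         Complete sentence(s) containing the keyword, or empty string if not found.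
--     """
--     if not keyword or not text:
--         return ""
--
--     # Find keyword position (case-insensitive)
--     keyword_lower = keyword.lower()
--     text_lower = text.lower()
--     pos = text_lower.find(keyword_lower)
--
--     if pos == -1:
--         return ""
--
--     # Find sentence boundaries around the keyword
--     text_length = len(text)
--
--     # Find start of sentence
--     start_pos = pos
--     while start_pos > 0 and text[start_pos - 1] not in ".!?":
--         start_pos -= 1
--
--     # Find end of sentence
--     end_pos = pos + len(keyword)
--     while end_pos < text_length and text[end_pos] not in ".!?":
--         end_pos += 1
--     end_pos = min(end_pos + 1, text_length)  # Include the period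
--
--     # Extract base sentence
--     base_sentence = text[start_pos:end_pos].strip()
--
--     # Add context sentences if requested
--     if context_sentences > 0:
--         # Look backward for context
--         context_start = start_pos
--         sentences_found = 0
--         while context_start > 0 and sentences_found < context_sentences:
--             context_start -= 1
--             if text[context_start] in ".!?":
--                 sentences_found += 1
--         if sentences_found < context_sentences:
--             context_start = 0
--
--         # Look forward for context
--         context_end = end_pos
--         sentences_found = 0
--         while context_end < text_length and sentences_found < context_sentences:
--             if text[context_end] in ".!?":
--                 sentences_found += 1
--             context_end += 1
--
--         return text[context_start:context_end].strip()
--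
--     return base_sentence
-- ===== SOURCE B (Python) =====
-- def extract_full_sentence_around_keyword(
--     text: str,
--     keyword: str,
--     context_sentences: int = 1,
-- ) -> str:
--     """Sentence-window extraction via a precomputed list of boundary indices."""
--     if not keyword or not text:
--         return ""
--     pos = text.lower().find(keyword.lower())
--     if pos == -1:
--         return ""
--     n = len(text)
--     bnds = [i for i in range(n) if text[i] in ".!?"]
--     before = [b for b in bnds if b < pos]
--     start = before[-1] + 1 if before else 0
--     after = [b for b in bnds if b >= pos + len(keyword)]
--     end = min(after[0] + 1, n) if after else n
--     if context_sentences <= 0: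
--         return text[start:end].strip()
--     back = [b for b in bnds if b < start]
--     if len(back) >= context_sentences:
--         ctx_start = back[len(back) - context_sentences]
--     else:
--         ctx_start = 0
--     fwd = [b for b in bnds if b >= end]
--     if len(fwd) >= context_sentences:
--         ctx_end = fwd[context_sentences - 1] + 1
--     else:
--         ctx_end = n
--     return text[ctx_start:ctx_end].strip()
-- ===== Notes on version B (the rewrite author's own statement) =====
-- stated objective: alternative
-- what changed: A's four character-by-character while loops (sentence start, sentence end, backward and forward context) are replaced by one precomputed list of sentence-boundary indices that is filtered and indexed to obtain the same window bounds.
import Mathlib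
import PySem

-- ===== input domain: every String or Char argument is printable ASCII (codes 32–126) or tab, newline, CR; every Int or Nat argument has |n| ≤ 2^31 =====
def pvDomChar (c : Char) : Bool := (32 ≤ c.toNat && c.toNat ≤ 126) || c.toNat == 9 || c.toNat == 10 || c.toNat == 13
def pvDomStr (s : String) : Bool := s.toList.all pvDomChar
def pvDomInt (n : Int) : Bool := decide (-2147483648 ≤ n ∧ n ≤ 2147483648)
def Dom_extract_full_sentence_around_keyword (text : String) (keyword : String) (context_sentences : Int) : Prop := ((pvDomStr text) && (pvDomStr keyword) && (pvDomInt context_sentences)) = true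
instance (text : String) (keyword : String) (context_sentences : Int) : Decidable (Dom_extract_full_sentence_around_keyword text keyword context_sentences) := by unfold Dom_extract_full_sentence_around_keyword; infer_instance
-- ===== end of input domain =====

-- B replaces A's four character-by-character while loops with one precomputed list of
-- sentence-boundary indices that is filtered and indexed (objective: alternative decomposition).

-- ===== PORT A =====
-- `c in ".!?"`: Python substring membership of the 1-char string text[i] = membership of the char.
def pvIsB (c : Char) : Bool := c == '.' || c == '!' || c == '?'

-- `while start_pos > 0 and text[start_pos - 1] not in ".!?": start_pos -= 1`
def pvStartLoop (l : List Char) : Nat → Nat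
  | 0 => 0
  | s+1 => if pvIsB (l.getD s ' ') then s+1 else pvStartLoop l s

-- `while end_pos < text_length and text[end_pos] not in ".!?": end_pos += 1`
def pvEndLoop (l : List Char) (e : Nat) : Nat :=
  if h : e < l.length then (if pvIsB (l.getD e ' ') then e else pvEndLoop l (e+1)) else e
termination_by l.length - e

-- `while context_start > 0 and sentences_found < context_sentences: context_start -= 1; if text[context_start] in ".!?": sentences_found += 1`
-- (A's trailing `if sentences_found < context_sentences: context_start = 0` is a no-op: that exit already has context_start = 0.)
def pvBackLoop (l : List Char) (cs : Int) : Nat → Int → Nat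
  | 0, _ => 0
  | c+1, found =>
    if found < cs then
      (if pvIsB (l.getD c ' ') then pvBackLoop l cs c (found+1) else pvBackLoop l cs c found)
    else c+1

-- `while context_end < text_length and sentences_found < context_sentences: if text[context_end] in ".!?": sentences_found += 1; context_end += 1`
def pvFwdLoop (l : List Char) (cs : Int) (e : Nat) (found : Int) : Nat :=
  if h : e < l.length then
    if found < cs then
      (if pvIsB (l.getD e ' ') then pvFwdLoop l cs (e+1) (found+1) else pvFwdLoop l cs (e+1) found)
    else e
  else e
termination_by l.length - e

def extract_full_sentence_around_keyword (text : String) (keyword : String) (context_sentences : Int) : String :=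
  if keyword.toList = [] ∨ text.toList = [] then "" else
  let pos := PySem.Str.find (PySem.Str.lower text) (PySem.Str.lower keyword)
  if pos == -1 then "" else
  let l := text.toList
  let n := l.length
  let p := pos.toNat   -- pos ≥ 0 in this branch, so toNat is exact
  let startPos := pvStartLoop l p
  let endPos := min (pvEndLoop l (p + keyword.toList.length) + 1) n
  let base := String.ofList (PySem.Chars.strip (PySem.List.slice l (some (startPos : Int)) (some (endPos : Int))))
  if context_sentences > 0 then
    let ctxStart := pvBackLoop l context_sentences startPos 0
    let ctxEnd := pvFwdLoop l context_sentences endPos 0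
    String.ofList (PySem.Chars.strip (PySem.List.slice l (some (ctxStart : Int)) (some (ctxEnd : Int))))
  else base

-- ===== PORT B =====
-- bnds = [i for i in range(n) if text[i] in ".!?"]
def pvBnds (l : List Char) : List Int :=
  (PySem.List.pyRange 0 (l.length : Int) 1).filter (fun i => pvIsB (PySem.List.pyGetD l i ' '))

-- before = [b for b in bnds if b < pos]; start = before[-1] + 1 if before else 0
def pvStartB (l : List Char) (pos : Int) : Int :=
  match ((pvBnds l).filter (fun b => b < pos)).getLast? with
  | some b => b + 1
  | none => 0

-- after = [b for b in bnds if b >= lo]; end = min(after[0] + 1, n) if after else n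
def pvEndB (l : List Char) (lo : Int) : Int :=
  match ((pvBnds l).filter (fun b => lo ≤ b)).head? with
  | some b => min (b + 1) (l.length : Int)
  | none => (l.length : Int)

-- back = [b for b in bnds if b < start]; ctx_start = back[len(back)-cs] if len(back) >= cs else 0
def pvCtxStartB (l : List Char) (start cs : Int) : Int :=
  let back := (pvBnds l).filter (fun b => b < start)
  if cs ≤ (back.length : Int) then PySem.List.pyGetD back ((back.length : Int) - cs) 0 else 0

-- fwd = [b for b in bnds if b >= end]; ctx_end = fwd[cs-1] + 1 if len(fwd) >= cs else n
def pvCtxEndB (l : List Char) (endP cs : Int) : Int :=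
  let fwd := (pvBnds l).filter (fun b => endP ≤ b)
  if cs ≤ (fwd.length : Int) then PySem.List.pyGetD fwd (cs - 1) 0 + 1 else (l.length : Int)

def extract_full_sentence_around_keyword_alt (text : String) (keyword : String) (context_sentences : Int) : String :=
  if keyword.toList = [] ∨ text.toList = [] then "" else
  let pos := PySem.Str.find (PySem.Str.lower text) (PySem.Str.lower keyword)
  if pos == -1 then "" else
  let l := text.toList
  let start := pvStartB l pos
  let endP := pvEndB l (pos + (keyword.toList.length : Int))
  if context_sentences ≤ 0 then
    String.ofList (PySem.Chars.strip (PySem.List.slice l (some start) (some endP)))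
  else
    String.ofList (PySem.Chars.strip (PySem.List.slice l
      (some (pvCtxStartB l start context_sentences))
      (some (pvCtxEndB l endP context_sentences))))

-- ===== PRECONDITION & SPEC =====
def Spec_extract_full_sentence_around_keyword (text : String) (keyword : String) (context_sentences : Int) (out : String) : Prop := out = extract_full_sentence_around_keyword_alt text keyword context_sentences
instance (text : String) (keyword : String) (context_sentences : Int) (out : String) : Decidable (Spec_extract_full_sentence_around_keyword text keyword context_sentences out) := by unfold Spec_extract_full_sentence_around_keyword; infer_instance

-- ===== CLAIM (what is proved, stated in full; the proofs are below) =====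
def Claim_equal_extract_full_sentence_around_keyword : Prop := ∀ (text : String) (keyword : String) (context_sentences : Int), Dom_extract_full_sentence_around_keyword text keyword context_sentences → Spec_extract_full_sentence_around_keyword text keyword context_sentences (extract_full_sentence_around_keyword text keyword context_sentences)

-- ===== LEMMAS AND PROOFS =====

-- Indices of sentence boundaries among the first c characters.
def pvF (l : List Char) (c : Nat) : List Nat := (List.range c).filter (fun i => pvIsB (l.getD i ' '))
-- Indices of sentence boundaries at positions ≥ e.
def pvH (l : List Char) (e : Nat) : List Nat := (List.range' e (l.length - e)).filter (fun i => pvIsB (l.getD i ' '))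

theorem pvF_succ (l : List Char) (c : Nat) :
    pvF l (c+1) = pvF l c ++ (if pvIsB (l.getD c ' ') then [c] else []) := by
  simp [pvF, List.range_succ, List.filter_append]; split <;> simp_all

theorem pv_range_filter_lt {n p : Nat} (h : p ≤ n) :
    (List.range n).filter (fun i => decide (i < p)) = List.range p := by
  induction n with
  | zero => have : p = 0 := by omega
            subst this; simp
  | succ n ih =>
    rcases Nat.lt_or_ge p (n+1) with h1 | h1
    · rw [List.range_succ, List.filter_append, ih (by omega)]; simp; omega
    · have : p = n+1 := by omega
      subst this
      rw [List.filter_eq_self.2]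
      intro a ha; simp [List.mem_range] at ha; simp; omega

theorem pvF_filter_lt (l : List Char) {p c : Nat} (h : p ≤ c) :
    (pvF l c).filter (fun i => decide (i < p)) = pvF l p := by
  unfold pvF
  rw [List.filter_comm, pv_range_filter_lt h]

theorem pvH_eq_filter_le (l : List Char) {e : Nat} (h : e ≤ l.length) :
    (pvF l l.length).filter (fun i => decide (e ≤ i)) = pvH l e := by
  unfold pvF pvH
  rw [List.filter_comm]
  congr 1
  have h2 : List.range l.length = List.range' 0 e ++ List.range' e (l.length - e) := by
    rw [List.range_eq_range']
    have h3 := List.range'_append_1 (s := 0) (m := e) (n := l.length - e)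
    simp at h3
    rw [h3]; congr 1; omega
  rw [h2, List.filter_append]
  rw [List.filter_eq_nil_iff.2, List.filter_eq_self.2]
  · simp
  · intro a ha; simp [List.mem_range'_1] at ha ⊢; omega
  · intro a ha; simp [List.mem_range'_1] at ha ⊢; omega

theorem pvH_nil (l : List Char) {e : Nat} (h : l.length ≤ e) : pvH l e = [] := by
  simp [pvH, Nat.sub_eq_zero_of_le h]

theorem pvH_cons (l : List Char) {e : Nat} (h : e < l.length) :
    pvH l e = (if pvIsB (l.getD e ' ') then [e] else []) ++ pvH l (e+1) := by
  unfold pvH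
  have h1 : l.length - e = (l.length - (e+1)) + 1 := by omega
  rw [h1, List.range'_succ, List.filter_cons]
  split <;> simp

theorem mem_pvF_lt (l : List Char) (c : Nat) {i : Nat} (h : i ∈ pvF l c) : i < c := by
  simp [pvF, List.mem_filter, List.mem_range] at h; exact h.1

theorem mem_pvH_lt (l : List Char) (e : Nat) {i : Nat} (h : i ∈ pvH l e) : i < l.length := by
  simp [pvH, List.mem_filter, List.mem_range'_1] at h; omega

theorem pvStartLoop_le (l : List Char) (s : Nat) : pvStartLoop l s ≤ s := by
  induction s with
  | zero => simp [pvStartLoop]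
  | succ s ih => simp only [pvStartLoop]; split <;> omega

theorem pvStartLoop_eq (l : List Char) (s : Nat) :
    pvStartLoop l s = (match (pvF l s).getLast? with | some b => b + 1 | none => 0) := by
  induction s with
  | zero => simp [pvStartLoop, pvF]
  | succ s ih =>
    rw [pvF_succ]
    simp only [pvStartLoop]
    split
    · simp
    · simpa using ih

theorem pvEndLoop_eq_aux (l : List Char) : ∀ (k e : Nat), l.length - e = k → e ≤ l.length →
    pvEndLoop l e = (match (pvH l e).head? with | some b => b | none => l.length) := by
  intro k
  induction k with
  | zero =>
    intro e hk he
    have he' : e = l.length := by omega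
    subst he'
    rw [pvH_nil l (le_refl _)]
    rw [pvEndLoop]
    simp
  | succ k ih =>
    intro e hk he
    have hlt : e < l.length := by omega
    rw [pvEndLoop, dif_pos hlt, pvH_cons l hlt]
    split
    · simp
    · rw [ih (e+1) (by omega) (by omega)]
      simp

theorem pvEndLoop_eq (l : List Char) {e : Nat} (he : e ≤ l.length) :
    pvEndLoop l e = (match (pvH l e).head? with | some b => b | none => l.length) :=
  pvEndLoop_eq_aux l (l.length - e) e rfl he

theorem pvBackLoop_eq (l : List Char) (cs : Int) :
    ∀ (c : Nat) (found : Int), found < cs →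
    pvBackLoop l cs c found =
      (if cs - found ≤ ((pvF l c).length : Int)
       then (pvF l c).getD ((pvF l c).length - (cs - found).toNat) 0
       else 0) := by
  intro c
  induction c with
  | zero =>
    intro found hf
    rw [if_neg]
    · rfl
    · simp [pvF]; omega
  | succ c ih =>
    intro found hf
    rw [pvBackLoop, if_pos hf, pvF_succ]
    by_cases hq : pvIsB (l.getD c ' ') = true
    · rw [if_pos hq, if_pos hq]
      rw [List.length_append]
      by_cases h1 : found + 1 < cs
      · rw [ih (found+1) h1]
        by_cases h2 : cs - (found+1) ≤ ((pvF l c).length : Int)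
        · rw [if_pos h2, if_pos (by simp; omega)]
          rw [List.getD_append _ _ _ _ (by simp; omega)]
          congr 1
          simp
          omega
        · rw [if_neg h2, if_neg (by simp; omega)]
      · have hcs : cs = found + 1 := by omega
        have hret : pvBackLoop l cs c (found+1) = c := by
          cases c with
          | zero => rfl
          | succ c' => rw [pvBackLoop, if_neg (by omega)]
        rw [hret, if_pos (by simp; omega)]
        have h3 : (cs - found).toNat = 1 := by omega
        rw [h3]
        simp
    · rw [if_neg hq, if_neg hq, List.append_nil]
      exact ih found hf

theorem pvFwdLoop_eq_aux (l : List Char) (cs : Int) :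
    ∀ (k e : Nat) (found : Int), l.length - e = k → e ≤ l.length → found < cs →
    pvFwdLoop l cs e found =
      (if cs - found ≤ ((pvH l e).length : Int)
       then (pvH l e).getD ((cs - found).toNat - 1) 0 + 1
       else l.length) := by
  intro k
  induction k with
  | zero =>
    intro e found hk he hf
    have he' : e = l.length := by omega
    rw [pvFwdLoop, dif_neg (by omega), pvH_nil l (by omega), if_neg (by simp; omega), he']
  | succ k ih =>
    intro e found hk he hf
    have hlt : e < l.length := by omega
    rw [pvFwdLoop, dif_pos hlt, if_pos hf, pvH_cons l hlt]
    by_cases hq : pvIsB (l.getD e ' ') = true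
    · rw [if_pos hq, if_pos hq]
      by_cases h1 : found + 1 < cs
      · rw [ih (e+1) (found+1) (by omega) (by omega) h1]
        simp only [List.singleton_append, List.length_cons]
        by_cases h2 : cs - (found+1) ≤ ((pvH l (e+1)).length : Int)
        · rw [if_pos h2, if_pos (by push_cast; omega)]
          have h4 : (cs - found).toNat - 1 = ((cs - (found+1)).toNat - 1) + 1 := by omega
          rw [h4, List.getD_cons_succ]
        · rw [if_neg h2, if_neg (by push_cast; omega)]
      · have hcs : cs = found + 1 := by omega
        have hret : pvFwdLoop l cs (e+1) (found+1) = e+1 := by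
          rw [pvFwdLoop]
          by_cases h5 : e + 1 < l.length
          · rw [dif_pos h5, if_neg (by omega)]
          · rw [dif_neg h5]
        rw [hret, if_pos (by simp; omega)]
        have h3 : (cs - found).toNat = 1 := by omega
        rw [h3]
        simp
    · rw [if_neg hq, if_neg hq, List.nil_append]
      exact ih (e+1) found (by omega) (by omega) hf

theorem pvFwdLoop_eq (l : List Char) (cs : Int) (e : Nat) (found : Int) (he : e ≤ l.length) (hf : found < cs) :
    pvFwdLoop l cs e found =
      (if cs - found ≤ ((pvH l e).length : Int)
       then (pvH l e).getD ((cs - found).toNat - 1) 0 + 1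
       else l.length) :=
  pvFwdLoop_eq_aux l cs (l.length - e) e found rfl he hf

theorem pvBnds_eq (l : List Char) : pvBnds l = (pvF l l.length).map (fun i : Nat => (i : Int)) := by
  unfold pvBnds pvF
  rw [PySem.List.pyRange_one]
  rw [show (fun k : Nat => (0:Int) + (k:Int)) = (fun k : Nat => (k:Int)) from funext fun k => by ring]
  rw [show ((l.length : Int) - 0).toNat = l.length from by omega]
  rw [List.filter_map]
  rw [show ((fun i => pvIsB (PySem.List.pyGetD l i ' ')) ∘ (fun k : Nat => (k:Int))) = (fun k : Nat => pvIsB (l.getD k ' ')) from funext fun k => by simp]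

theorem pvBnds_filter_lt (l : List Char) {p : Nat} (hp : p ≤ l.length) :
    (pvBnds l).filter (fun b => decide (b < (p : Int))) = (pvF l p).map (fun i : Nat => (i : Int)) := by
  rw [pvBnds_eq, List.filter_map]
  rw [show ((fun b => decide (b < (p : Int))) ∘ (fun i : Nat => (i : Int))) = (fun i : Nat => decide (i < p)) from funext (fun i => by simp)]
  rw [pvF_filter_lt l hp]

theorem pvBnds_filter_le (l : List Char) {e : Nat} (he : e ≤ l.length) :
    (pvBnds l).filter (fun b => decide ((e : Int) ≤ b)) = (pvH l e).map (fun i : Nat => (i : Int)) := by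
  rw [pvBnds_eq, List.filter_map]
  rw [show ((fun b => decide ((e : Int) ≤ b)) ∘ (fun i : Nat => (i : Int))) = (fun i : Nat => decide (e ≤ i)) from funext (fun i => by simp)]
  rw [pvH_eq_filter_le l he]

theorem pvBnds_filter_le_nil (l : List Char) {e : Nat} (he : l.length < e) :
    (pvBnds l).filter (fun b => decide ((e : Int) ≤ b)) = [] := by
  rw [pvBnds_eq, List.filter_map]
  rw [List.filter_eq_nil_iff.2, List.map_nil]
  intro i hi
  have := mem_pvF_lt l l.length hi
  simp
  omega

theorem pvStartB_eq (l : List Char) {p : Nat} (hp : p ≤ l.length) :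
    pvStartB l (p : Int) = ((pvStartLoop l p : Nat) : Int) := by
  unfold pvStartB
  rw [pvBnds_filter_lt l hp, List.getLast?_map, pvStartLoop_eq]
  cases (pvF l p).getLast? <;> simp

theorem pvEndB_eq (l : List Char) (e : Nat) :
    pvEndB l (e : Int) = ((min (pvEndLoop l e + 1) l.length : Nat) : Int) := by
  unfold pvEndB
  by_cases he : e ≤ l.length
  · rw [pvBnds_filter_le l he, List.head?_map, pvEndLoop_eq l he]
    cases h : (pvH l e).head? with
    | none => simp
    | some b =>
      have hb : b < l.length := mem_pvH_lt l e (List.mem_of_mem_head? h)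
      simp
  · rw [pvBnds_filter_le_nil l (by omega)]
    have h1 : pvEndLoop l e = e := by rw [pvEndLoop, dif_neg (by omega)]
    rw [h1]
    simp
    omega

theorem pvCtxStartB_eq (l : List Char) {s : Nat} (hs : s ≤ l.length) {cs : Int} (hcs : 0 < cs) :
    pvCtxStartB l (s : Int) cs = ((pvBackLoop l cs s 0 : Nat) : Int) := by
  simp only [pvCtxStartB]
  rw [pvBnds_filter_lt l hs, List.length_map, pvBackLoop_eq l cs s 0 hcs]
  rw [Int.sub_zero]
  by_cases hc : cs ≤ ((pvF l s).length : Int)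
  · rw [if_pos hc, if_pos hc]
    have hL1 : 1 ≤ (pvF l s).length := by omega
    have hidx : (pvF l s).length - cs.toNat < (pvF l s).length := by omega
    rw [List.getD_eq_getElem _ _ hidx]
    rw [PySem.List.pyGetD_eq_getElem _ 0 (by omega) (by rw [List.length_map]; omega)]
    rw [List.getElem_map]
    simp only [show ((((pvF l s).length : Int) - cs).toNat) = (pvF l s).length - cs.toNat from by omega]
  · rw [if_neg hc, if_neg hc]
    rfl

theorem pvCtxEndB_eq (l : List Char) {e : Nat} (he : e ≤ l.length) {cs : Int} (hcs : 0 < cs) :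
    pvCtxEndB l (e : Int) cs = ((pvFwdLoop l cs e 0 : Nat) : Int) := by
  simp only [pvCtxEndB]
  rw [pvBnds_filter_le l he, List.length_map, pvFwdLoop_eq l cs e 0 he hcs]
  rw [Int.sub_zero]
  by_cases hc : cs ≤ ((pvH l e).length : Int)
  · rw [if_pos hc, if_pos hc]
    have hidx : cs.toNat - 1 < (pvH l e).length := by omega
    rw [List.getD_eq_getElem _ _ hidx]
    rw [PySem.List.pyGetD_eq_getElem _ 0 (by omega) (by rw [List.length_map]; omega)]
    rw [List.getElem_map]
    simp only [show ((cs - 1).toNat) = cs.toNat - 1 from by omega]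
    push_cast
    ring
  · rw [if_neg hc, if_neg hc]

-- ===== VERDICT (by name: the statement is the Claim_ definition above) =====
theorem extract_full_sentence_around_keyword_spec : Claim_equal_extract_full_sentence_around_keyword := by
  intro text keyword cs hdom
  unfold Spec_extract_full_sentence_around_keyword
  by_cases hk : keyword.toList = [] ∨ text.toList = []
  · simp only [extract_full_sentence_around_keyword, extract_full_sentence_around_keyword_alt,
      if_pos hk]
  by_cases hneg : PySem.Chars.find (PySem.Chars.lower text.toList) (PySem.Chars.lower keyword.toList) = -1
  · simp only [extract_full_sentence_around_keyword, extract_full_sentence_around_keyword_alt,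
      if_neg hk, PySem.Str.find_eq, PySem.Str.toList_lower, beq_iff_eq, if_pos hneg]
  simp only [extract_full_sentence_around_keyword, extract_full_sentence_around_keyword_alt,
      if_neg hk, PySem.Str.find_eq, PySem.Str.toList_lower, beq_iff_eq, if_neg hneg]
  set l := text.toList with hldef
  set pos := PySem.Chars.find (PySem.Chars.lower l) (PySem.Chars.lower keyword.toList) with hposdef
  have h0 : 0 ≤ pos := by
    have h1 := PySem.Chars.neg_one_le_find (PySem.Chars.lower l) (PySem.Chars.lower keyword.toList)
    rw [← hposdef] at h1
    omega
  have hple : pos.toNat ≤ l.length := by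
    have h1 := PySem.Chars.find_le_length (PySem.Chars.lower l) (PySem.Chars.lower keyword.toList)
    rw [← hposdef] at h1
    have h2 : (PySem.Chars.lower l).length = l.length := by simp [PySem.Chars.lower]
    omega
  have hcast : pos = ((pos.toNat : Nat) : Int) := (Int.toNat_of_nonneg h0).symm
  rw [hcast]
  simp only [Int.toNat_natCast]
  rw [show ((pos.toNat : Int) + (keyword.toList.length : Int)) = ((pos.toNat + keyword.toList.length : Nat) : Int) by push_cast; ring]
  rw [pvStartB_eq l hple, pvEndB_eq l (pos.toNat + keyword.toList.length)]
  by_cases hcs : cs ≤ 0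
  · rw [if_neg (by omega : ¬ 0 < cs), if_pos hcs]
  · rw [if_pos (by omega : 0 < cs), if_neg hcs]
    rw [pvCtxStartB_eq l (le_trans (pvStartLoop_le l _) hple) (by omega : (0:Int) < cs)]
    rw [pvCtxEndB_eq l (Nat.min_le_right _ _) (by omega : (0:Int) < cs)]
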